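-- pv_equiv track=rewrite | github.com/hueglot12/dumpless-gui | domain.py | analyze_subdomains
-- ===== SOURCE A (Python) =====
-- SUSPICIOUS_KEYWORDS = [
--     "admin", "panel", "cp", "dashboard",
--     "pay", "payment", "billing",
--     "auth", "login", "secure", "account"
-- ]
--
-- def analyze_subdomains(subdomains: list[str]) -> list[str]:
--     result = []
--     for s in subdomains:
--         for k in SUSPICIOUS_KEYWORDS:
--             if k in s.lower():
--                 result.append(s)
--                 break
--     return result
-- ===== SOURCE B (Python) =====
-- SUSPICIOUS_KEYWORDS = [
--     "admin", "panel", "cp", "dashboard",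
--     "pay", "payment", "billing",
--     "auth", "login", "secure", "account"
-- ]
--
-- def analyze_subdomains(subdomains: list[str]) -> list[str]:
--     # Position-based scan: walk the lowered string once and at each position
--     # test whether any keyword starts there, instead of one substring search
--     # per keyword.
--     result = []
--     for s in subdomains:
--         t = s.lower()
--         hit = False
--         i = 0
--         while i < len(t) and not hit:
--             for k in SUSPICIOUS_KEYWORDS:
--                 if t.startswith(k, i):
--                     hit = True
--                     break
--             i += 1
--         if hit:
--             result.append(s)
--     return result
-- ===== Notes on version B (the rewrite author's own statement) =====
-- stated objective: alternative
-- what changed: Replaces the per-keyword substring search ('k in s.lower()' with break) by a single left-to-right scan of the lowered string that at each position tests whether any keyword starts there.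
import Mathlib
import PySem

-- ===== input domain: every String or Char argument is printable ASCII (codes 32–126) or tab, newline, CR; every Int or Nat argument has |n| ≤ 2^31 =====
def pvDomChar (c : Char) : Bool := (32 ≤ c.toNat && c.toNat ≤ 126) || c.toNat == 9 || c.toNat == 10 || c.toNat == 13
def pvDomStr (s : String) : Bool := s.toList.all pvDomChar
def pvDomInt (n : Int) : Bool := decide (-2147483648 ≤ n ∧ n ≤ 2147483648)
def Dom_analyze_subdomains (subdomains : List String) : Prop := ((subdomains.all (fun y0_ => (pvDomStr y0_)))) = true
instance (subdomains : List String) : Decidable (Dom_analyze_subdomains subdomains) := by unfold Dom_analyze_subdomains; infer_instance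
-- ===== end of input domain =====

-- B replaces A's per-keyword substring search by one left-to-right scan of the
-- lowered string testing at each position whether any keyword starts there
-- (objective: alternative; same asymptotic cost).

def SUSPICIOUS_KEYWORDS : List String :=
  ["admin", "panel", "cp", "dashboard",
   "pay", "payment", "billing",
   "auth", "login", "secure", "account"]

-- ===== PORT A =====
-- the inner 'for k in SUSPICIOUS_KEYWORDS: if k in t: append; break' loop
def aHit (t : String) : List String → Bool
  | [] => false
  | k :: rest => if PySem.Str.isIn k t then true else aHit t rest

def analyze_subdomains (subdomains : List String) : List String :=
  subdomains.foldl
    (fun result s =>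
      if aHit (PySem.Str.lower s) SUSPICIOUS_KEYWORDS then result ++ [s] else result)
    []

-- ===== PORT B =====
-- 'any keyword starts at the current position' (t.startswith(k, i) on the suffix)
def bMatchHere (cs : List Char) : Bool :=
  SUSPICIOUS_KEYWORDS.any (fun k => k.toList.isPrefixOf cs)

-- the 'while i < len(t) and not hit' scan: try each position left to right
def bScan : List Char → Bool
  | [] => false
  | c :: rest => bMatchHere (c :: rest) || bScan rest

def analyze_subdomains_alt (subdomains : List String) : List String :=
  subdomains.foldl
    (fun result s =>
      if bScan (PySem.Str.lower s).toList then result ++ [s] else result)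
    []

-- ===== PRECONDITION & SPEC =====
def Spec_analyze_subdomains (subdomains : List String) (out : List String) : Prop := out = analyze_subdomains_alt subdomains
instance (subdomains : List String) (out : List String) : Decidable (Spec_analyze_subdomains subdomains out) := by unfold Spec_analyze_subdomains; infer_instance

-- ===== CLAIM (what is proved, stated in full; the proofs are below) =====
def Claim_equal_analyze_subdomains : Prop := ∀ (subdomains : List String), Dom_analyze_subdomains subdomains → Spec_analyze_subdomains subdomains (analyze_subdomains subdomains)

-- ===== LEMMAS AND PROOFS =====

theorem aHit_iff (t : String) (ks : List String) :
    aHit t ks = true ↔ ∃ k ∈ ks, k.toList <:+: t.toList := by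
  induction ks with
  | nil => simp [aHit]
  | cons k rest ih =>
    simp only [aHit]
    split_ifs with h
    · simp only [true_iff]
      exact ⟨k, by simp, (PySem.Str.isIn_iff_infix k t).1 h⟩
    · rw [ih]
      constructor
      · rintro ⟨k', hk', hinf⟩; exact ⟨k', by simp [hk'], hinf⟩
      · rintro ⟨k', hk', hinf⟩
        rcases List.mem_cons.1 hk' with rfl | hmem
        · exact absurd ((PySem.Str.isIn_iff_infix k' t).2 hinf) h
        · exact ⟨k', hmem, hinf⟩

theorem keywords_nonempty : ∀ k ∈ SUSPICIOUS_KEYWORDS, k.toList ≠ [] := by decide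

theorem bScan_iff (cs : List Char) :
    bScan cs = true ↔ ∃ k ∈ SUSPICIOUS_KEYWORDS, k.toList <:+: cs := by
  induction cs with
  | nil =>
    simp only [bScan]
    constructor
    · intro h; exact absurd h (by simp)
    · rintro ⟨k, hk, hinf⟩
      exact absurd (List.eq_nil_of_infix_nil hinf) (keywords_nonempty k hk)
  | cons c rest ih =>
    simp only [bScan, Bool.or_eq_true, ih, bMatchHere, List.any_eq_true]
    constructor
    · rintro (⟨k, hk, hpre⟩ | ⟨k, hk, hinf⟩)
      · exact ⟨k, hk, (List.isPrefixOf_iff_prefix.1 hpre).isInfix⟩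
      · exact ⟨k, hk, hinf.trans (List.infix_cons (List.infix_refl rest))⟩
    · rintro ⟨k, hk, hinf⟩
      rcases List.infix_cons_iff.1 hinf with hpre | hinf'
      · exact Or.inl ⟨k, hk, List.isPrefixOf_iff_prefix.2 hpre⟩
      · exact Or.inr ⟨k, hk, hinf'⟩

theorem hit_eq_scan (s : String) :
    aHit (PySem.Str.lower s) SUSPICIOUS_KEYWORDS = bScan (PySem.Str.lower s).toList := by
  rw [Bool.eq_iff_iff, aHit_iff, bScan_iff]

-- ===== VERDICT (by name: the statement is the Claim_ definition above) =====
theorem analyze_subdomains_spec : Claim_equal_analyze_subdomains := by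
  intro subdomains _
  unfold Spec_analyze_subdomains analyze_subdomains analyze_subdomains_alt
  congr 1
  funext result s
  rw [hit_eq_scan]
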